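-- pv_equiv track=rewrite | github.com/miliar/Code_Jam_Webscraper | solutions_python/Problem_97/858.py | recycled
-- ===== SOURCE A (Python) =====
-- def recycled(n,m):
--     p = str(n)
--     q = str(m)
--     for i in range(0, len(p)):
--         p = rotate(p)
--         if p == q:
--             return True
--     return False
--
-- def rotate(s):
--     return s[-1] + s[0:-1];
-- ===== SOURCE B (Python) =====
-- def recycled(n, m):
--     p, q = str(n), str(m)
--     return len(p) == len(q) and q in p + p
-- ===== Notes on version B (the rewrite author's own statement) =====
-- stated objective: simpler
-- what changed: Replaces the explicit loop that generates and compares each of the len(p) rotations (building a new string per step) with the classic doubled-string test: q is a rotation of p iff the lengths match and q occurs as a substring of p+p.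
import Mathlib
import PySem

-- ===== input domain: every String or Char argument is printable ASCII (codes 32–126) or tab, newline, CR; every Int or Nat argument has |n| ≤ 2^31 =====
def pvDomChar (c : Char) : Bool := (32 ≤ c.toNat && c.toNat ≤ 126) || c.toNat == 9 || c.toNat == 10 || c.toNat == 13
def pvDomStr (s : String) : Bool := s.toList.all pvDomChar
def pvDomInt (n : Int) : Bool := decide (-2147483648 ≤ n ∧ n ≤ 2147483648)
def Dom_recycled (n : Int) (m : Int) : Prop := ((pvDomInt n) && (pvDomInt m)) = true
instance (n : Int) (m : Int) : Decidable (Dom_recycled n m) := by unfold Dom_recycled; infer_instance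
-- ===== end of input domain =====

-- B replaces A's per-rotation generate-and-compare loop by the doubled-string rotation
-- test (length check plus one substring search in p+p); objective: simpler.

-- ===== PORT A =====
-- rotate(s) = s[-1] + s[0:-1]; exact for nonempty s (str(n) is never empty, so the
-- IndexError branch of s[-1] is unreachable; Option.toList renders the single char).
def pyRotateA (s : List Char) : List Char :=
  (PySem.List.pyGet? s (-1)).toList ++ PySem.List.slice s (some 0) (some (-1))

-- 'for i in range(0, len(p)): p = rotate(p); if p == q: return True' / 'return False'
def recycledLoop (q : List Char) : List Char → Nat → Bool
  | _, 0 => false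
  | p, Nat.succ k =>
      let p' := pyRotateA p
      if p' = q then true else recycledLoop q p' k

def recycled (n : Int) (m : Int) : Bool :=
  let p := PySem.Int.toChars n
  let q := PySem.Int.toChars m
  recycledLoop q p p.length

-- ===== PORT B =====
def recycled_alt (n : Int) (m : Int) : Bool :=
  let p := PySem.Int.toChars n
  let q := PySem.Int.toChars m
  decide (p.length = q.length) && PySem.Chars.isIn q (p ++ p)

-- ===== PRECONDITION & SPEC =====
def Spec_recycled (n : Int) (m : Int) (out : Bool) : Prop := out = recycled_alt n m
instance (n : Int) (m : Int) (out : Bool) : Decidable (Spec_recycled n m out) := by unfold Spec_recycled; infer_instance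

-- ===== CLAIM (what is proved, stated in full; the proofs are below) =====
def Claim_equal_recycled : Prop := ∀ (n : Int) (m : Int), Dom_recycled n m → Spec_recycled n m (recycled n m)

-- ===== LEMMAS AND PROOFS =====

theorem toDigitsCore_len_ge (b : Nat) : ∀ (fuel n : Nat) (ds : List Char),
    ds.length ≤ (Nat.toDigitsCore b fuel n ds).length
  | 0, _, _ => le_refl _
  | fuel+1, n, ds => by
      simp only [Nat.toDigitsCore]
      split
      · simp
      · exact le_trans (by simp) (toDigitsCore_len_ge b fuel (n/b) _)

theorem toDigits_ne_nil (b n : Nat) : Nat.toDigits b n ≠ [] := by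
  unfold Nat.toDigits
  intro h
  have h2 : (1:Nat) ≤ (Nat.toDigitsCore b (n+1) n []).length := by
    simp only [Nat.toDigitsCore]
    split
    · simp
    · exact le_trans (by simp) (toDigitsCore_len_ge b n _ _)
  rw [h] at h2; simp at h2

theorem toChars_ne_nil (n : Int) : PySem.Int.toChars n ≠ [] := by
  unfold PySem.Int.toChars
  split
  · simp
  · exact toDigits_ne_nil 10 n.toNat

theorem pyRotateA_eq (s : List Char) (h : s ≠ []) :
    pyRotateA s = s.getLast h :: s.dropLast := by
  have hlen : 0 < s.length := List.length_pos_iff.mpr h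
  unfold pyRotateA
  rw [PySem.List.pyGet?_neg_one, List.getLast?_eq_some_getLast h]
  have h2 : PySem.List.slice s (some 0) (some (-1)) = s.dropLast := by
    simp [PySem.List.slice]
    rw [List.dropLast_eq_take]
  rw [h2]; rfl

theorem pyRotateA_rotate_one (s : List Char) (h : s ≠ []) :
    (pyRotateA s).rotate 1 = s := by
  rw [pyRotateA_eq s h]
  rw [List.rotate_cons_succ, List.rotate_zero, List.dropLast_append_getLast]

theorem pyRotateA_of_rotate_one (s : List Char) (h : s ≠ []) :
    pyRotateA (s.rotate 1) = s := by
  cases s with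
  | nil => exact absurd rfl h
  | cons a l =>
      rw [List.rotate_cons_succ, List.rotate_zero]
      rw [pyRotateA_eq (l ++ [a]) (by simp)]
      rw [List.getLast_append_singleton, List.dropLast_concat]

theorem pyRotateA_ne_nil (s : List Char) (h : s ≠ []) : pyRotateA s ≠ [] := by
  rw [pyRotateA_eq s h]; simp

theorem pyRotateA_length (s : List Char) (h : s ≠ []) :
    (pyRotateA s).length = s.length := by
  rw [pyRotateA_eq s h]
  simp [List.length_dropLast]
  exact (Nat.succ_pred_eq_of_pos (List.length_pos_iff.mpr h))

theorem iter_length (k : Nat) (p : List Char) (h : p ≠ []) :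
    (pyRotateA^[k] p).length = p.length := by
  induction k generalizing p with
  | zero => simp
  | succ k ih =>
      rw [Function.iterate_succ_apply, ih _ (pyRotateA_ne_nil p h), pyRotateA_length p h]

theorem iter_rotate (k : Nat) (p : List Char) (h : p ≠ []) :
    (pyRotateA^[k] p).rotate k = p := by
  induction k generalizing p with
  | zero => simp
  | succ k ih =>
      rw [Function.iterate_succ_apply]
      have hne := pyRotateA_ne_nil p h
      calc (pyRotateA^[k] (pyRotateA p)).rotate (k+1)
          = ((pyRotateA^[k] (pyRotateA p)).rotate k).rotate 1 := by
            rw [List.rotate_rotate]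
        _ = (pyRotateA p).rotate 1 := by rw [ih _ hne]
        _ = p := pyRotateA_rotate_one p h

theorem iter_of_rotate (k : Nat) (q : List Char) (h : q ≠ []) :
    pyRotateA^[k] (q.rotate k) = q := by
  induction k with
  | zero => simp
  | succ k ih =>
      rw [Function.iterate_succ_apply]
      have h1 : q.rotate (k+1) = (q.rotate k).rotate 1 := by rw [List.rotate_rotate]
      have h2 : q.rotate k ≠ [] := by simp [List.rotate_eq_nil_iff, h]
      rw [h1, pyRotateA_of_rotate_one _ h2, ih]

theorem iter_iff (k : Nat) (p q : List Char) (h : p ≠ []) :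
    pyRotateA^[k] p = q ↔ q.rotate k = p := by
  constructor
  · intro hk; rw [← hk, iter_rotate k p h]
  · intro hk
    have hq : q ≠ [] := by
      intro hq; rw [hq] at hk; simp at hk; exact h hk
    have h2 := iter_of_rotate k q hq
    rw [hk] at h2
    exact h2

theorem loop_iff (q : List Char) : ∀ (fuel : Nat) (p : List Char),
    recycledLoop q p fuel = true ↔ ∃ k, 1 ≤ k ∧ k ≤ fuel ∧ pyRotateA^[k] p = q
  | 0, p => by simp [recycledLoop]
  | fuel+1, p => by
      simp only [recycledLoop]
      split
      · rename_i heq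
        simp only [true_iff]
        exact ⟨1, le_refl _, by omega, by simpa using heq⟩
      · rename_i hne
        rw [loop_iff q fuel (pyRotateA p)]
        constructor
        · rintro ⟨k, hk1, hk2, hk⟩
          exact ⟨k+1, by omega, by omega, by rwa [Function.iterate_succ_apply]⟩
        · rintro ⟨k, hk1, hk2, hk⟩
          match k, hk1 with
          | 1, _ => exact absurd (by simpa using hk) hne
          | k+2, _ =>
              exact ⟨k+1, by omega, by omega, by rwa [Function.iterate_succ_apply] at hk⟩

-- doubled-string characterisation: with equal lengths, q is a substring of p++p iff q is a rotation of p
theorem infix_doubled_iff (p q : List Char) (hlen : p.length = q.length) :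
    q <:+: p ++ p ↔ ∃ j, j ≤ p.length ∧ p.rotate j = q := by
  constructor
  · rintro ⟨s, t, hst⟩
    refine ⟨s.length, ?_, ?_⟩
    · have := congrArg List.length hst
      simp at this; omega
    · have hdrop : (p ++ p).drop s.length = q ++ t := by
        rw [← hst, List.append_assoc, List.drop_left]
      have hj : s.length ≤ p.length := by
        have := congrArg List.length hst
        simp at this; omega
      have hdrop2 : (p ++ p).drop s.length = p.drop s.length ++ p := by
        rw [List.drop_append]
        congr 1
        rw [Nat.sub_eq_zero_of_le hj, List.drop_zero]
      have hq : q = (p.drop s.length ++ p).take q.length := by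
        rw [← hdrop2, hdrop, List.take_left]
      rw [List.rotate_eq_drop_append_take hj]
      rw [hq, List.take_append]
      congr 1
      · rw [List.take_of_length_le (by simp; omega)]
      · congr 1
        simp
        omega
  · rintro ⟨j, hj, hq⟩
    rw [List.rotate_eq_drop_append_take hj] at hq
    exact ⟨p.take j, p.drop j, by
      rw [← hq, ← List.append_assoc (p.take j) (p.drop j) (p.take j),
          List.append_assoc (p.take j ++ p.drop j) (p.take j) (p.drop j),
          List.take_append_drop]⟩

theorem rotations_bridge (p q : List Char) (h : p ≠ []) (hlen : p.length = q.length) :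
    (∃ k, 1 ≤ k ∧ k ≤ p.length ∧ q.rotate k = p) ↔ ∃ j, j ≤ p.length ∧ p.rotate j = q := by
  have hq : q.length = p.length := hlen.symm
  constructor
  · rintro ⟨k, hk1, hk2, hk⟩
    refine ⟨p.length - k, by omega, ?_⟩
    have hrr : p.rotate (p.length - k) = q.rotate (k + (p.length - k)) := by
      rw [← List.rotate_rotate, hk]
    rw [hrr, show k + (p.length - k) = q.length by omega, List.rotate_length]
  · rintro ⟨j, hj, hpj⟩
    by_cases h0 : j = 0 ∨ j = p.length
    · have hqp : q = p := by
        rcases h0 with h0 | h0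
        · rw [← hpj, h0, List.rotate_zero]
        · rw [← hpj, h0, List.rotate_length]
      refine ⟨p.length, by simpa [Nat.one_le_iff_ne_zero, List.length_eq_zero_iff] using h,
        le_refl _, ?_⟩
      rw [hqp, List.rotate_length]
    · push_neg at h0
      refine ⟨p.length - j, by omega, by omega, ?_⟩
      rw [← hpj, List.rotate_rotate, show j + (p.length - j) = p.length by omega,
          List.rotate_length]

-- ===== VERDICT (by name: the statement is the Claim_ definition above) =====
theorem recycled_spec : Claim_equal_recycled := by
  intro n m _
  unfold Spec_recycled recycled recycled_alt
  simp only []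
  set p := PySem.Int.toChars n with hp
  set q := PySem.Int.toChars m with hq
  have hpne : p ≠ [] := toChars_ne_nil n
  rw [Bool.eq_iff_iff]
  simp only [Bool.and_eq_true, decide_eq_true_eq]
  rw [loop_iff]
  by_cases hlen : p.length = q.length
  · rw [PySem.Chars.isIn_iff_infix, infix_doubled_iff p q hlen, ← rotations_bridge p q hpne hlen]
    constructor
    · rintro ⟨k, hk1, hk2, hk⟩
      exact ⟨hlen, k, hk1, hk2, (iter_iff k p q hpne).mp hk⟩
    · rintro ⟨_, k, hk1, hk2, hk⟩
      exact ⟨k, hk1, hk2, (iter_iff k p q hpne).mpr hk⟩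
  · constructor
    · rintro ⟨k, hk1, hk2, hk⟩
      exfalso
      apply hlen
      rw [← hk, iter_length k p hpne]
    · rintro ⟨hl, _⟩
      exact absurd hl hlen
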